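-- pv_equiv track=rewrite | github.com/stathisp18056/miniDB | SqlCompiler.py | updete
-- ===== SOURCE A (Python) =====
-- def updete(values,table):
--
-- # ΕΠΙΣΤΡΕΦΕΙ ΤΟΝ ΠΙΝΑΚΑ  ΤΙΣ ΜΕΤΑΒΛΗΤΕΣ ΠΟΥ ΠΡΟΚΙΤΕ ΝΑ ΕΝΗΜΕΡΩΘΟΥΝ ΚΑΙ ΤΙΣ ΝΕΕΣ ΤΙΜΕΣ ΤΟΥΣ
--
--     values = values.split(",")
--     tmpvalues = []
--     for item in values:
--         if item.replace(" ","") !="":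
--             tmpvalues.append(item)
--     columns =[]
--     newvalues = []
--     flag = True
--     for item in tmpvalues:
--         if len(item.split("=") )!=2:
--             flag = False
--             break
--     if flag:
--         for item in tmpvalues:
--             columns.append(item.split("=")[0].replace(" ",""))
--             newvalues.append(item.split("=")[1].replace(" ",""))
--     if tmpvalues == []:
--         flag = False
--     return flag,columns , newvalues,table
-- ===== SOURCE B (Python) =====
-- def updete(values, table):
--     items = [it for it in values.split(",") if it.replace(" ", "") != ""]
--     columns, newvalues = [], []
--     for it in items:
--         parts = it.split("=")
--         if len(parts) != 2:
--             return False, [], [], table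
--         columns.append(parts[0].replace(" ", ""))
--         newvalues.append(parts[1].replace(" ", ""))
--     return bool(items), columns, newvalues, table
-- ===== Notes on version B (the rewrite author's own statement) =====
-- stated objective: simpler
-- what changed: Replaces A's three sequential scans (filter loop, flag/break validation loop, extraction loop) by one filter comprehension plus a single pass that validates and extracts together, returning early on an invalid item; bool(items) replaces the trailing empty-check flag reset.
import Mathlib
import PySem

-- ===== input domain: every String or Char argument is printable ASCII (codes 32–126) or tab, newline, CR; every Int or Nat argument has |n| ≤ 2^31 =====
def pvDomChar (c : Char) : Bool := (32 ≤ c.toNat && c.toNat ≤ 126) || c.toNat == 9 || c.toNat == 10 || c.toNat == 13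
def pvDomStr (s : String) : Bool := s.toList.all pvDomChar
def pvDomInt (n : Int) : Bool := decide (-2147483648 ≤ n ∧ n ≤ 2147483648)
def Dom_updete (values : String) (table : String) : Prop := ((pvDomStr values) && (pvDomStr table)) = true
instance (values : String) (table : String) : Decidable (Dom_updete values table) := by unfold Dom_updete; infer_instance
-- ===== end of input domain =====

-- B replaces A's three sequential scans (filter, validate-with-break, extract) by one
-- filter plus a single validating/extracting pass with early return: simpler decomposition.


-- ===== PORT A =====
-- s.split(sep) with literal nonempty sep: PySem.Str.split? is 'some' there, the default is never taken
def pySplit (s sep : String) : List String := (PySem.Str.split? s sep).getD []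

-- 'for item in tmpvalues: if len(item.split("="))!=2: flag=False; break'
def updeteFlagLoop : List String → Bool
  | [] => true
  | it :: rest =>
    if (pySplit it "=").length ≠ 2 then false else updeteFlagLoop rest

def updete (values : String) (table : String) : Bool × List String × List String × String :=
  let vs := pySplit values ","
  let tmpvalues := vs.foldl (fun acc it => if PySem.Str.replace it " " "" ≠ "" then acc ++ [it] else acc) ([] : List String)
  let flag := updeteFlagLoop tmpvalues
  -- the extraction loop appends to both lists in one pass; indexing [0]/[1] is guarded by flag (len = 2)
  let cv :=
    if flag then
      tmpvalues.foldl (fun (p : List String × List String) it =>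
        (p.1 ++ [PySem.Str.replace ((pySplit it "=").getD 0 "") " " ""],
         p.2 ++ [PySem.Str.replace ((pySplit it "=").getD 1 "") " " ""])) ([], [])
    else ([], [])
  let flag := if tmpvalues = [] then false else flag
  (flag, cv.1, cv.2, table)

-- ===== PORT B =====
-- the single validating/extracting pass with early return (False, [], [], table)
def updeteAltGo : List String → List String → List String → Bool × List String × List String
  | [], cols, vals => (true, cols, vals)
  | it :: rest, cols, vals =>
    let parts := pySplit it "="
    if parts.length ≠ 2 then (false, [], [])
    else updeteAltGo rest (cols ++ [PySem.Str.replace (parts.getD 0 "") " " ""])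
                          (vals ++ [PySem.Str.replace (parts.getD 1 "") " " ""])

def updete_alt (values : String) (table : String) : Bool × List String × List String × String :=
  let items := (pySplit values ",").filter (fun it => PySem.Str.replace it " " "" ≠ "")
  let r := updeteAltGo items [] []
  (r.1 && !items.isEmpty, r.2.1, r.2.2, table)

-- ===== PRECONDITION & SPEC =====
def Spec_updete (values : String) (table : String) (out : Bool × List String × List String × String) : Prop := out = updete_alt values table
instance (values : String) (table : String) (out : Bool × List String × List String × String) : Decidable (Spec_updete values table out) := by unfold Spec_updete; infer_instance

-- ===== CLAIM (what is proved, stated in full; the proofs are below) =====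
def Claim_equal_updete : Prop := ∀ (values : String) (table : String), Dom_updete values table → Spec_updete values table (updete values table)

-- ===== LEMMAS AND PROOFS =====

-- B's single pass, characterised by A's two loops
theorem updeteAltGo_eq (items : List String) : ∀ (cols vals : List String),
    updeteAltGo items cols vals =
      if updeteFlagLoop items then
        (true,
         cols ++ items.map (fun it => PySem.Str.replace ((pySplit it "=").getD 0 "") " " ""),
         vals ++ items.map (fun it => PySem.Str.replace ((pySplit it "=").getD 1 "") " " ""))
      else (false, [], []) := by
  induction items with
  | nil => intro cols vals; simp [updeteAltGo, updeteFlagLoop]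
  | cons it rest ih =>
    intro cols vals
    simp only [updeteAltGo, updeteFlagLoop]
    by_cases h : (pySplit it "=").length ≠ 2
    · simp [h]
    · by_cases hf : updeteFlagLoop rest = true <;> simp [h, hf, ih]

-- A's one extraction loop with two appends = two maps
theorem pairFold (f g : String → String) (l : List String) : ∀ (c v : List String),
    l.foldl (fun (p : List String × List String) it => (p.1 ++ [f it], p.2 ++ [g it])) (c, v)
      = (c ++ l.map f, v ++ l.map g) := by
  induction l with
  | nil => intro c v; simp
  | cons it rest ih => intro c v; simp [List.foldl, ih]

-- A's filter loop = filter (stated for A's exact loop body)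
theorem filterFold (l : List String) : ∀ (acc : List String),
    l.foldl (fun acc it => if PySem.Str.replace it " " "" ≠ "" then acc ++ [it] else acc) acc
      = acc ++ l.filter (fun it => PySem.Str.replace it " " "" ≠ "") := by
  induction l with
  | nil => intro acc; simp
  | cons it rest ih =>
    intro acc
    simp only [List.foldl]
    by_cases h : PySem.Str.replace it " " "" ≠ ""
    · rw [if_pos h, ih, List.filter_cons_of_pos (by simpa using h)]; simp
    · rw [if_neg h, ih, List.filter_cons_of_neg (by simpa using h)]

-- ===== VERDICT (by name: the statement is the Claim_ definition above) =====
theorem updete_spec : Claim_equal_updete := by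
  intro values table _
  show updete values table = updete_alt values table
  simp only [updete, updete_alt, filterFold, updeteAltGo_eq, pairFold, List.nil_append]
  generalize (pySplit values ",").filter (fun it => PySem.Str.replace it " " "" ≠ "") = tmp
  by_cases hf : updeteFlagLoop tmp = true
  · simp only [hf, if_true]
    cases tmp <;> simp
  · cases tmp <;> simp [hf]
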